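-- pv_equiv track=rewrite | github.com/RightBank/UrbanCLIP | Utils/functions.py | construct_uf_word_place_dict
-- ===== SOURCE A (Python) =====
-- def construct_uf_word_place_dict(uf_vocab_dict):
--     count = 0
--     uf_word_place_dict = {}
--     function_name_list = list(uf_vocab_dict.keys())
--     for uf, uot_list in uf_vocab_dict.items():
--         uf_index = int(function_name_list.index(uf))
--         for uot in uot_list:
--             if uf_index not in uf_word_place_dict:
--                 uf_word_place_dict[uf_index] = []
--             uf_word_place_dict[uf_index].append(count)
--             count += 1
--     return uf_word_place_dict
-- ===== SOURCE B (Python) =====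
-- def construct_uf_word_place_dict(uf_vocab_dict):
--     lens = [len(v) for v in uf_vocab_dict.values()]
--     starts = [0]
--     for n in lens:
--         starts.append(starts[-1] + n)
--     return {i: list(range(starts[i], starts[i] + n))
--             for i, n in enumerate(lens) if n > 0}
-- ===== Notes on version B (the rewrite author's own statement) =====
-- stated objective: faster
-- what changed: Instead of one incremental pass that looks up each key's position with list.index and appends one counter value at a time, B builds a length table, computes prefix-sum start offsets, and emits each key's positions as a whole range keyed by its enumerate index.
import Mathlib
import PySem

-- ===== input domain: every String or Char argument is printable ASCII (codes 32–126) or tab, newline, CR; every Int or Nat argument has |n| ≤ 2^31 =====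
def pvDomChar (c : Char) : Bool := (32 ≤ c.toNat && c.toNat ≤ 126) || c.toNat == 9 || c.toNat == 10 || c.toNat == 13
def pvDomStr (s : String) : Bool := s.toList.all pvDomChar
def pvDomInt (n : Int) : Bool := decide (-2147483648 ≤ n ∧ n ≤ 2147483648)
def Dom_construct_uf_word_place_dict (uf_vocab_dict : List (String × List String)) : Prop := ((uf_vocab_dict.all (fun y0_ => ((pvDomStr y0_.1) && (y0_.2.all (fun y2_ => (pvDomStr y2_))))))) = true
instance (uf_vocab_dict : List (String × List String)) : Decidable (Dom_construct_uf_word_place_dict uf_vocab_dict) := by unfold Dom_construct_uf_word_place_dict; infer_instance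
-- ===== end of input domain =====

-- B replaces A's single incremental pass (list.index per key + append-one-counter-at-a-time)
-- by a length table with prefix-sum start offsets, emitting each key's positions as one range.

-- ===== PORT A =====
-- body of A's inner `for uot in uot_list:` loop; state = (count, uf_word_place_dict)
def pvA_inner (ufIdx : Int) (st : Int × PySem.Dict Int (List Int)) (_uot : String) :
    Int × PySem.Dict Int (List Int) :=
  let d := if st.2.contains ufIdx then st.2 else st.2.insert ufIdx []  -- if uf_index not in dict: dict[uf_index] = []
  (st.1 + 1, d.modify ufIdx [] (fun l => l ++ [st.1]))                 -- dict[uf_index].append(count); count += 1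

def construct_uf_word_place_dict (uf_vocab_dict : List (String × List String)) : List (Int × List Int) :=
  let function_name_list := uf_vocab_dict.map Prod.fst
  (uf_vocab_dict.foldl
    (fun st p =>
      -- uf_index = int(function_name_list.index(uf)); index always succeeds (uf is a key), getD 0 unreachable
      let uf_index : Int := (((PySem.List.index? function_name_list p.1).getD 0 : Nat) : Int)
      p.2.foldl (pvA_inner uf_index) st)
    ((0 : Int), PySem.Dict.empty)).2.items

-- ===== PORT B =====
def construct_uf_word_place_dict_alt (uf_vocab_dict : List (String × List String)) : List (Int × List Int) :=
  let lens : List Int := uf_vocab_dict.map (fun p => ((p.2.length : Int)))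
  let starts : List Int := lens.foldl (fun s n => s ++ [PySem.List.pyGetD s (-1) 0 + n]) [0]
  (PySem.List.enumerate lens).foldl
    (fun acc q =>
      if q.2 > 0 then
        acc ++ [(q.1, PySem.List.pyRange (PySem.List.pyGetD starts q.1 0) (PySem.List.pyGetD starts q.1 0 + q.2) 1)]
      else acc)
    []

-- ===== PRECONDITION & SPEC =====
-- Pre_ requires the keys to be pairwise distinct: the Python argument is a dict, whose keys are
-- always distinct, so this excludes no input the Python function can receive; on association
-- lists with duplicated keys the two ports legitimately differ (list.index finds the first copy).
def Pre_construct_uf_word_place_dict (uf_vocab_dict : List (String × List String)) : Prop :=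
  (uf_vocab_dict.map Prod.fst).Nodup
instance (uf_vocab_dict : List (String × List String)) : Decidable (Pre_construct_uf_word_place_dict uf_vocab_dict) := by unfold Pre_construct_uf_word_place_dict; infer_instance

def pvWitness_construct_uf_word_place_dict : (List (String × List String)) :=
  [("a", ["x", "y"]), ("b", []), ("c", ["z"])]

def Spec_construct_uf_word_place_dict (uf_vocab_dict : List (String × List String)) (out : List (Int × List Int)) : Prop := out = construct_uf_word_place_dict_alt uf_vocab_dict
instance (uf_vocab_dict : List (String × List String)) (out : List (Int × List Int)) : Decidable (Spec_construct_uf_word_place_dict uf_vocab_dict out) := by unfold Spec_construct_uf_word_place_dict; infer_instance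

-- ===== CLAIM (what is proved, stated in full; the proofs are below) =====
def Claim_equal_construct_uf_word_place_dict : Prop := ∀ (uf_vocab_dict : List (String × List String)), Dom_construct_uf_word_place_dict uf_vocab_dict → Pre_construct_uf_word_place_dict uf_vocab_dict → Spec_construct_uf_word_place_dict uf_vocab_dict (construct_uf_word_place_dict uf_vocab_dict)

-- ===== LEMMAS AND PROOFS =====

-- the common shape both programs compute: consecutive ranges, one per key with a nonempty list
def pvBS : List (Int × Int) → Int → List (Int × List Int)
  | [], _ => []
  | q :: rest, c => (if q.2 > 0 then [(q.1, PySem.List.pyRange c (c + q.2) 1)] else []) ++ pvBS rest (c + q.2)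

-- prefix sums starting from c (B's `starts` tail)
def pvPS (c : Int) : List Int → List Int
  | [] => []
  | n :: rest => (c + n) :: pvPS (c + n) rest

lemma pvPS_getD (lens : List Int) : ∀ (c : Int) (j : Nat), j ≤ lens.length →
    (c :: pvPS c lens).getD j 0 = c + ((lens.take j).sum) := by
  induction lens with
  | nil =>
    intro c j hj
    cases j with
    | zero => simp
    | succ j => simp at hj
  | cons n rest ih =>
    intro c j hj
    cases j with
    | zero => simp
    | succ j => simpa [pvPS, add_assoc] using ih (c + n) j (by simpa using hj)

lemma pvStarts_eq (lens : List Int) : ∀ (s0 : List Int) (h : s0 ≠ []),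
    lens.foldl (fun s n => s ++ [PySem.List.pyGetD s (-1) 0 + n]) s0
      = s0 ++ pvPS (s0.getLast h) lens := by
  induction lens with
  | nil => intro s0 h; simp [pvPS]
  | cons n rest ih =>
    intro s0 h
    have hlast : PySem.List.pyGetD s0 (-1) 0 = s0.getLast h := PySem.List.pyGetD_neg_one s0 0 h
    simp only [List.foldl_cons, hlast]
    rw [ih (s0 ++ [s0.getLast h + n]) (by simp)]
    simp [pvPS]

lemma pvEnumerate_map {α β : Type} (f : α → β) (l : List α) : ∀ (s : Int),
    PySem.List.enumerate (l.map f) s = (PySem.List.enumerate l s).map (fun q => (q.1, f q.2)) := by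
  induction l with
  | nil => intro s; simp [PySem.List.enumerate_nil]
  | cons x xs ih => intro s; simp [PySem.List.enumerate_cons, ih]

-- ---- B side: the alt port computes pvBS ----

lemma pvB_fold (lens : List Int) : ∀ (suf pre : List Int) (acc : List (Int × List Int)),
    lens = pre ++ suf →
    (PySem.List.enumerate suf (pre.length : Int)).foldl
      (fun acc q =>
        if q.2 > 0 then
          acc ++ [(q.1, PySem.List.pyRange (PySem.List.pyGetD (0 :: pvPS 0 lens) q.1 0)
            (PySem.List.pyGetD (0 :: pvPS 0 lens) q.1 0 + q.2) 1)]
        else acc) acc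
    = acc ++ pvBS (PySem.List.enumerate suf (pre.length : Int)) pre.sum := by
  intro suf
  induction suf with
  | nil => intro pre acc _; simp [PySem.List.enumerate_nil, pvBS]
  | cons n suf ih =>
    intro pre acc hl
    rw [PySem.List.enumerate_cons, List.foldl_cons]
    have hget : PySem.List.pyGetD (0 :: pvPS 0 lens) ((pre.length : Nat) : Int) 0 = pre.sum := by
      rw [PySem.List.pyGetD_natCast]
      have hle : pre.length ≤ lens.length := by rw [hl]; simp
      rw [pvPS_getD lens 0 pre.length hle, hl, List.take_left]
      simp
    simp only [hget]
    have hlen : ((pre ++ [n]).length : Int) = (pre.length : Int) + 1 := by simp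
    have hnext := ih (pre ++ [n])
      (if n > 0 then acc ++ [((pre.length : Int), PySem.List.pyRange pre.sum (pre.sum + n) 1)] else acc)
      (by rw [hl]; simp)
    rw [hlen, List.sum_append] at hnext
    simp only [List.sum_cons, List.sum_nil, add_zero] at hnext
    rw [hnext]
    simp only [pvBS]
    split_ifs <;> simp [List.append_assoc]

lemma pvB_eq_bs (uf_vocab_dict : List (String × List String)) :
    construct_uf_word_place_dict_alt uf_vocab_dict
      = pvBS (PySem.List.enumerate (uf_vocab_dict.map (fun p => ((p.2.length : Int)))) 0) 0 := by
  simp only [construct_uf_word_place_dict_alt]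
  rw [pvStarts_eq (uf_vocab_dict.map (fun p => ((p.2.length : Int)))) [0] (by simp)]
  have h0 : ([0] : List Int).getLast (by simp) = 0 := rfl
  rw [h0, List.singleton_append]
  have := pvB_fold (uf_vocab_dict.map (fun p => ((p.2.length : Int))))
    (uf_vocab_dict.map (fun p => ((p.2.length : Int)))) [] [] rfl
  simpa using this

-- ---- A side ----

lemma pvMk_contains_false (pre : List (Int × List Int)) (i : Int)
    (h : ∀ q ∈ pre, q.1 ≠ i) : (PySem.Dict.mk pre).contains i = false := by
  simp only [PySem.Dict.contains, List.any_eq_false]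
  intro q hq; simpa using h q hq

lemma pvMk_getD_last (pre : List (Int × List Int)) (i : Int) (acc : List Int)
    (h : ∀ q ∈ pre, q.1 ≠ i) : (PySem.Dict.mk (pre ++ [(i, acc)])).getD i [] = acc := by
  induction pre with
  | nil => simp [PySem.Dict.getD, PySem.Dict.get?]
  | cons q pre ih =>
    have hq : (q.1 == i) = false := by simpa using h q (by simp)
    have := ih (fun r hr => h r (List.mem_cons_of_mem _ hr))
    simpa [PySem.Dict.getD, PySem.Dict.get?, List.find?, hq] using this

lemma pvMk_insert_last (pre : List (Int × List Int)) (i : Int) (acc v : List Int)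
    (h : ∀ q ∈ pre, q.1 ≠ i) :
    (PySem.Dict.mk (pre ++ [(i, acc)])).insert i v = PySem.Dict.mk (pre ++ [(i, v)]) := by
  have hc : (PySem.Dict.mk (pre ++ [(i, acc)])).contains i = true := by
    simp [PySem.Dict.contains]
  simp only [PySem.Dict.insert, hc, if_true]
  congr 1
  rw [List.map_append]
  have h1 : List.map (fun p => if (p.1 == i) = true then (i, v) else p) pre = pre := by
    rw [List.map_congr_left (g := id) (fun p hp => by simp [h p hp]), List.map_id]
  rw [h1]
  simp

lemma pvA_inner_fold (i : Int) (us : List String) : ∀ (c : Int) (pre : List (Int × List Int)) (acc : List Int),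
    (∀ q ∈ pre, q.1 ≠ i) →
    us.foldl (pvA_inner i) (c, PySem.Dict.mk (pre ++ [(i, acc)]))
      = (c + us.length, PySem.Dict.mk (pre ++ [(i, acc ++ PySem.List.pyRange c (c + us.length) 1)])) := by
  induction us with
  | nil =>
    intro c pre acc h
    simp [PySem.List.pyRange_one_eq_nil (le_refl c)]
  | cons u us ih =>
    intro c pre acc h
    have hc : (PySem.Dict.mk (pre ++ [(i, acc)])).contains i = true := by
      simp [PySem.Dict.contains]
    have hstep : pvA_inner i (c, PySem.Dict.mk (pre ++ [(i, acc)])) u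
        = (c + 1, PySem.Dict.mk (pre ++ [(i, acc ++ [c])])) := by
      simp only [pvA_inner, PySem.Dict.modify, hc, if_true]
      rw [pvMk_getD_last pre i acc h, pvMk_insert_last pre i acc _ h]
    rw [List.foldl_cons, hstep, ih (c + 1) pre (acc ++ [c]) h]
    have h1 : c + 1 + (us.length : Int) = c + ((u :: us).length : Int) := by push_cast [List.length_cons]; ring
    rw [h1]
    have h2 : acc ++ [c] ++ PySem.List.pyRange (c + 1) (c + ((u :: us).length : Int)) 1
        = acc ++ PySem.List.pyRange c (c + ((u :: us).length : Int)) 1 := by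
      rw [PySem.List.pyRange_one_cons (show c < c + ((u :: us).length : Int) by push_cast [List.length_cons]; omega)]
      simp
    rw [h2]

lemma pvA_pair (i : Int) (us : List String) (c : Int) (pre : List (Int × List Int))
    (h : ∀ q ∈ pre, q.1 ≠ i) :
    us.foldl (pvA_inner i) (c, PySem.Dict.mk pre)
      = (c + us.length, PySem.Dict.mk (pre ++ (if (us.length : Int) > 0 then [(i, PySem.List.pyRange c (c + us.length) 1)] else []))) := by
  cases us with
  | nil => simp
  | cons u us =>
    have hc : (PySem.Dict.mk pre).contains i = false := pvMk_contains_false pre i h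
    have hstep : pvA_inner i (c, PySem.Dict.mk pre) u
        = (c + 1, PySem.Dict.mk (pre ++ [(i, [c])])) := by
      simp only [pvA_inner, PySem.Dict.modify, hc]
      have hins : (PySem.Dict.mk pre).insert i [] = PySem.Dict.mk (pre ++ [(i, ([] : List Int))]) := by
        simp [PySem.Dict.insert, hc]
      simp only [Bool.false_eq_true, if_false, hins]
      have hc2 : (PySem.Dict.mk (pre ++ [(i, ([] : List Int))])).contains i = true := by
        simp [PySem.Dict.contains]
      rw [pvMk_getD_last pre i _ h, pvMk_insert_last pre i _ _ h]
      simp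
    rw [List.foldl_cons, hstep, pvA_inner_fold i us (c + 1) pre [c] h]
    have h1 : c + 1 + (us.length : Int) = c + ((u :: us).length : Int) := by
      push_cast [List.length_cons]; ring
    rw [h1]
    have hpos : ((((u :: us).length : Nat)) : Int) > 0 := by push_cast [List.length_cons]; omega
    rw [if_pos hpos]
    have h2 : ([c] : List Int) ++ PySem.List.pyRange (c + 1) (c + ((u :: us).length : Int)) 1
        = PySem.List.pyRange c (c + ((u :: us).length : Int)) 1 := by
      rw [PySem.List.pyRange_one_cons (show c < c + ((u :: us).length : Int) by push_cast [List.length_cons]; omega)]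
      simp
    rw [h2]

lemma pvA_outer (ps : List (Int × List String)) : ∀ (c : Int) (pre : List (Int × List Int)),
    (∀ p ∈ ps, ∀ q ∈ pre, q.1 ≠ p.1) → (ps.map Prod.fst).Nodup →
    ps.foldl (fun st p => p.2.foldl (pvA_inner p.1) st) (c, PySem.Dict.mk pre)
      = (c + (ps.map (fun p => ((p.2.length : Int)))).sum,
         PySem.Dict.mk (pre ++ pvBS (ps.map (fun p => (p.1, (p.2.length : Int)))) c)) := by
  induction ps with
  | nil => intro c pre h hnd; simp [pvBS]
  | cons p ps ih =>
    intro c pre h hnd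
    have hpre : ∀ q ∈ pre, q.1 ≠ p.1 := fun q hq => h p (by simp) q hq
    rw [List.foldl_cons, pvA_pair p.1 p.2 c pre hpre]
    have hnd' := List.nodup_cons.mp (by rw [List.map_cons] at hnd; exact hnd)
    have h' : ∀ r ∈ ps, ∀ q ∈ pre ++ (if ((p.2.length : Nat) : Int) > 0 then [(p.1, PySem.List.pyRange c (c + p.2.length) 1)] else []), q.1 ≠ r.1 := by
      intro r hr q hq
      rcases List.mem_append.mp hq with hq | hq
      · exact h r (by simp [hr]) q hq
      · have hq1 : q.1 = p.1 := by split at hq <;> simp at hq; simp [hq]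
        rw [hq1]
        intro he
        exact hnd'.1 (by rw [he]; exact List.mem_map_of_mem hr)
    rw [ih (c + p.2.length) _ h' hnd'.2]
    simp [pvBS, List.append_assoc]
    ring

lemma pvIndex_prefix (a : List String) (v : String) (rest : List String) (hv : v ∉ a) :
    PySem.List.index? (a ++ v :: rest) v = some a.length := by
  exact (PySem.List.index?_eq_some_iff _ _ _).mpr ⟨a, rest, rfl, rfl, hv⟩

lemma pvA_index_fold (l : List (String × List String)) (h : (l.map Prod.fst).Nodup) :
    ∀ (suf pre : List (String × List String)) (st : Int × PySem.Dict Int (List Int)), l = pre ++ suf →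
    suf.foldl (fun st p =>
        p.2.foldl (pvA_inner (((PySem.List.index? (l.map Prod.fst) p.1).getD 0 : Nat) : Int)) st) st
      = (PySem.List.enumerate suf (pre.length : Int)).foldl
          (fun st q => q.2.2.foldl (pvA_inner q.1) st) st := by
  intro suf
  induction suf with
  | nil => intro pre st _; simp [PySem.List.enumerate_nil]
  | cons p suf ih =>
    intro pre st hl
    have hmap : l.map Prod.fst = pre.map Prod.fst ++ p.1 :: suf.map Prod.fst := by
      rw [hl]; simp
    have hnotin : p.1 ∉ pre.map Prod.fst := by
      have hnd := h; rw [hmap] at hnd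
      rcases List.nodup_append.mp hnd with ⟨_, _, hd⟩
      intro hm
      exact hd p.1 hm p.1 (by simp) rfl
    have hidx : PySem.List.index? (l.map Prod.fst) p.1 = some pre.length := by
      rw [hmap]
      simpa using pvIndex_prefix _ _ _ hnotin
    rw [List.foldl_cons, PySem.List.enumerate_cons, List.foldl_cons, hidx]
    have hlen : ((pre ++ [p]).length : Int) = (pre.length : Int) + 1 := by
      simp
    have := ih (pre ++ [p]) (p.2.foldl (pvA_inner (pre.length : Int)) st) (by rw [hl]; simp)
    rw [hlen] at this
    simpa using this

theorem pv_main (l : List (String × List String)) (h : (l.map Prod.fst).Nodup) :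
    construct_uf_word_place_dict l = construct_uf_word_place_dict_alt l := by
  simp only [construct_uf_word_place_dict]
  rw [show (PySem.Dict.empty : PySem.Dict Int (List Int)) = PySem.Dict.mk [] from rfl]
  rw [pvA_index_fold l h l [] ((0 : Int), PySem.Dict.mk []) rfl]
  have hfold : (PySem.List.enumerate l (([] : List (String × List String)).length : Int)).foldl
      (fun st q => q.2.2.foldl (pvA_inner q.1) st) (((0 : Int), PySem.Dict.mk []))
      = ((PySem.List.enumerate l 0).map (fun q => (q.1, q.2.2))).foldl
          (fun st p => p.2.foldl (pvA_inner p.1) st) (((0 : Int), PySem.Dict.mk [])) := by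
    rw [List.foldl_map]
    simp
  rw [hfold]
  have hnd : (((PySem.List.enumerate l 0).map (fun q => (q.1, q.2.2))).map Prod.fst).Nodup := by
    rw [List.map_map]
    have : ((PySem.List.enumerate l 0).map (Prod.fst ∘ fun q => (q.1, q.2.2)))
        = (PySem.List.enumerate l 0).map (fun q => q.1) := by simp
    rw [this, PySem.List.map_fst_enumerate]
    exact PySem.List.nodup_pyRange_one _ _
  rw [pvA_outer _ 0 [] (by simp) hnd]
  rw [pvB_eq_bs l, pvEnumerate_map (fun p => ((p.2.length : Int))) l 0]
  simp only [List.map_map]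
  rfl

-- ===== VERDICT (by name: the statement is the Claim_ definition above) =====
theorem construct_uf_word_place_dict_spec : Claim_equal_construct_uf_word_place_dict := by
  intro l _ hpre
  unfold Spec_construct_uf_word_place_dict
  exact pv_main l hpre
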